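-- pv_equiv track=rewrite | github.com/BearHanded/advent-of-code-2023 | 13/mirror.py | calc_mirrors
-- ===== SOURCE A (Python) =====
-- def calc_mirrors(group, clean_mirrors):
--     for idx in range(len(group) - 1):
--         size = min(idx + 1, len(group) - (idx + 1))
--         original = "".join(group[:idx+1][-size:])
--         reflection = "".join(group[idx+1:][:size][::-1])
--
--         if clean_mirrors and sum(1 for a, b in zip(original, reflection) if a != b) == 1:
--             return idx + 1
--         if not clean_mirrors and original == reflection:
--             return idx + 1
--     return 0
-- ===== SOURCE B (Python) =====
-- def _chars(group, rows):
--     text = ""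
--     for i in rows:
--         text += group[i]
--     return text
--
--
-- def calc_mirrors(group, clean_mirrors):
--     n = len(group)
--     for idx in range(n - 1):
--         size = min(idx + 1, n - idx - 1)
--         above = _chars(group, range(idx + 1 - size, idx + 1))
--         below = _chars(group, range(idx + size, idx, -1))
--         if clean_mirrors:
--             if sum(a != b for a, b in zip(above, below)) == 1:
--                 return idx + 1
--         elif above == below:
--             return idx + 1
--     return 0
-- ===== Notes on version B (the rewrite author's own statement) =====
-- stated objective: alternative
-- what changed: B drops A's slice/join/[::-1] string construction: it accumulates the two half-grids over explicit index ranges (walking the lower half downward instead of reversing a slice) and keeps A's exact comparisons on the results.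
import Mathlib
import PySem

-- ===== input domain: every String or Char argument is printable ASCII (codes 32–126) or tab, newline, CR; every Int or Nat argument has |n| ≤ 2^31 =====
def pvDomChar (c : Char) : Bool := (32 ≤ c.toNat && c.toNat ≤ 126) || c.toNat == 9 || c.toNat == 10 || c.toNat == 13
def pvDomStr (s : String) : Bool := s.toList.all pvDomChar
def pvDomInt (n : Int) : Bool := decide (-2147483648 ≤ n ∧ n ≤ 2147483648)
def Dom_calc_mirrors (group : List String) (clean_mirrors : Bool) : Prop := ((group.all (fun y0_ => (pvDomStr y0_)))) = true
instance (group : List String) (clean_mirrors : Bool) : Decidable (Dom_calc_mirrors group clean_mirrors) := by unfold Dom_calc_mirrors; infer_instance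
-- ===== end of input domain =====

-- B replaces A's slice/join/reverse construction by accumulating the two half-strings over
-- explicit index ranges (the lower half walked downward instead of reversed); objective: alternative.

-- ===== PORT A =====
-- loop body's condition for one idx, branches in A's order (second test unreachable when the first fires)
def condA (group : List String) (clean_mirrors : Bool) (idx : Int) : Bool :=
  let size : Int := min (idx + 1) ((group.length : Int) - (idx + 1))
  let original : String :=
    PySem.Str.join "" (PySem.List.slice (PySem.List.slice group none (some (idx + 1))) (some (-size)) none)
  -- group[idx+1:][:size][::-1]; step -1 never raises, so .getD [] is exact
  let reflection : String :=
    PySem.Str.join "" ((PySem.List.slice? (PySem.List.slice (PySem.List.slice group (some (idx + 1)) none) none (some size)) none none (-1)).getD [])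
  (clean_mirrors && ((original.toList.zip reflection.toList).countP (fun p => p.1 != p.2) == 1))
    || (!clean_mirrors && (original == reflection))

def loopA (group : List String) (clean_mirrors : Bool) : List Int → Int
  | [] => 0
  | idx :: rest => if condA group clean_mirrors idx then idx + 1 else loopA group clean_mirrors rest

def calc_mirrors (group : List String) (clean_mirrors : Bool) : Int :=
  loopA group clean_mirrors (PySem.List.pyRange 0 ((group.length : Int) - 1) 1)

-- ===== PORT B =====
-- _chars(group, rows): a string grown by '+='; ported as the accumulated List Char
def charsOf (group : List String) (rows : List Int) : List Char :=
  rows.foldl (fun text i => text ++ ((PySem.List.pyGet? group i).getD "").toList) []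
  -- group[i]; rows holds only in-range indices

def condB (group : List String) (clean_mirrors : Bool) (idx : Int) : Bool :=
  let n : Int := group.length
  let size : Int := min (idx + 1) (n - idx - 1)
  let above := charsOf group (PySem.List.pyRange (idx + 1 - size) (idx + 1) 1)
  let below := charsOf group (PySem.List.pyRange (idx + size) idx (-1))
  if clean_mirrors then
    ((above.zip below).map (fun p => if p.1 != p.2 then (1 : Int) else 0)).sum == 1
  else above == below

def loopB (group : List String) (clean_mirrors : Bool) : List Int → Int
  | [] => 0
  | idx :: rest => if condB group clean_mirrors idx then idx + 1 else loopB group clean_mirrors rest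

def calc_mirrors_alt (group : List String) (clean_mirrors : Bool) : Int :=
  loopB group clean_mirrors (PySem.List.pyRange 0 ((group.length : Int) - 1) 1)

-- ===== PRECONDITION & SPEC =====
def Spec_calc_mirrors (group : List String) (clean_mirrors : Bool) (out : Int) : Prop := out = calc_mirrors_alt group clean_mirrors
instance (group : List String) (clean_mirrors : Bool) (out : Int) : Decidable (Spec_calc_mirrors group clean_mirrors out) := by unfold Spec_calc_mirrors; infer_instance

-- ===== CLAIM (what is proved, stated in full; the proofs are below) =====
def Claim_equal_calc_mirrors : Prop := ∀ (group : List String) (clean_mirrors : Bool), Dom_calc_mirrors group clean_mirrors → Spec_calc_mirrors group clean_mirrors (calc_mirrors group clean_mirrors)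

-- ===== LEMMAS AND PROOFS =====

-- "".join over lists of characters is concatenation
theorem joinNilSep (ls : List (List Char)) : PySem.Chars.join [] ls = ls.flatten := by
  induction ls with
  | nil => simp [PySem.Chars.join_nil]
  | cons p rest ih =>
    cases rest with
    | nil => simp [PySem.Chars.join_singleton]
    | cons q r => simp [PySem.Chars.join_cons_cons, ih]

-- the rows picked out by a nonnegative range are a contiguous sublist
theorem mapRange (xs : List String) (k : Nat) : ∀ (a : Nat), a + k ≤ xs.length →
    (PySem.List.pyRange (a : Int) ((a : Int) + (k : Int)) 1).map
        (fun i => ((PySem.List.pyGet? xs i).getD "").toList)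
      = ((xs.drop a).take k).map String.toList := by
  induction k with
  | zero => intro a _; simp [PySem.List.pyRange_one_eq_nil]
  | succ k ih =>
    intro a ha
    have halen : a < xs.length := by omega
    have hlt : (a : Int) < (a : Int) + ((k + 1 : Nat) : Int) := by push_cast; omega
    rw [PySem.List.pyRange_one_cons hlt, List.map_cons,
      PySem.List.pyGet?_natCast, List.getElem?_eq_getElem halen]
    have h2 : (a : Int) + ((k + 1 : Nat) : Int) = ((a + 1 : Nat) : Int) + (k : Int) := by
      push_cast; ring
    have h1 : (a : Int) + 1 = ((a + 1 : Nat) : Int) := by push_cast; ring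
    have hm : a < (List.map String.toList xs).length := by simpa using halen
    rw [h2, h1, ih (a + 1) (by omega), List.map_take, List.map_drop, List.map_take, List.map_drop,
      List.drop_eq_getElem_cons hm, List.take_succ_cons, List.getElem_map, Option.getD_some]

theorem condAB (group : List String) (clean_mirrors : Bool) (j : Nat)
    (hj : (j : Int) < (group.length : Int) - 1) :
    condA group clean_mirrors (j : Int) = condB group clean_mirrors (j : Int) := by
  have hn : j + 2 ≤ group.length := by omega
  set s : Nat := min (j + 1) (group.length - (j + 1)) with hs
  have hs1 : 1 ≤ s := by omega
  have hsj : s ≤ j + 1 := by omega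
  have hsn : j + 1 + s ≤ group.length := by omega
  have hsize : min ((j : Int) + 1) ((group.length : Int) - ((j : Int) + 1)) = (s : Int) := by
    rw [hs]; push_cast; omega
  have hsize' : min ((j : Int) + 1) ((group.length : Int) - (j : Int) - 1) = (s : Int) := by
    rw [hs]; push_cast; omega
  set O : List String := (group.drop (j + 1 - s)).take s with hO
  set R : List String := (group.drop (j + 1)).take s with hR
  -- A's original is "".join(O), its reflection "".join(R.reverse)
  have horig : PySem.List.slice (PySem.List.slice group none (some ((j : Int) + 1)))
      (some (-(s : Int))) none = O := by
    have h1 : ((j : Int) + 1) = ((j + 1 : Nat) : Int) := by push_cast; ring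
    rw [h1, PySem.List.slice_to_natCast, PySem.List.slice_from_neg_natCast _ s hs1,
      List.length_take]
    have e1 : min (j + 1) group.length - s = j + 1 - s := by omega
    rw [e1, List.drop_take]
    have e2 : j + 1 - (j + 1 - s) = s := by omega
    rw [e2, hO]
  have hrefl : (PySem.List.slice? (PySem.List.slice (PySem.List.slice group (some ((j : Int) + 1)) none)
      none (some (s : Int))) none none (-1)).getD [] = R.reverse := by
    have h1 : ((j : Int) + 1) = ((j + 1 : Nat) : Int) := by push_cast; ring
    rw [h1, PySem.List.slice_from_natCast, PySem.List.slice_to_natCast,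
      PySem.List.slice?_none_none_neg_one]
    rfl
  -- B's row ranges visit the same rows
  have hleft : (PySem.List.pyRange ((j : Int) + 1 - (s : Int)) ((j : Int) + 1) 1).map
      (fun i => ((PySem.List.pyGet? group i).getD "").toList) = O.map String.toList := by
    have h1 : ((j : Int) + 1 - (s : Int)) = ((j + 1 - s : Nat) : Int) := by
      have : ((j + 1 - s : Nat) : Int) = (j : Int) + 1 - (s : Int) := by push_cast [hsj]; ring
      omega
    have h2 : ((j : Int) + 1) = ((j + 1 - s : Nat) : Int) + (s : Int) := by
      push_cast [hsj]; ring
    rw [h1, h2, mapRange group s (j + 1 - s) (by omega), hO]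
  have hright : (PySem.List.pyRange ((j : Int) + (s : Int)) (j : Int) (-1)).map
      (fun i => ((PySem.List.pyGet? group i).getD "").toList) = (R.map String.toList).reverse := by
    rw [PySem.List.pyRange_neg_one_eq_reverse, List.map_reverse]
    have h1 : ((j : Int) + 1) = ((j + 1 : Nat) : Int) := by push_cast; ring
    have h2 : ((j : Int) + (s : Int) + 1) = ((j + 1 : Nat) : Int) + (s : Int) := by push_cast; ring
    rw [h1, h2, mapRange group s (j + 1) (by omega), hR]
  set L' : List Char := (O.map String.toList).flatten with hL'
  set R' : List Char := ((R.map String.toList).reverse).flatten with hR'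
  -- B's accumulated strings are those rows flattened
  have hLchars : charsOf group (PySem.List.pyRange ((j : Int) + 1 - (s : Int)) ((j : Int) + 1) 1) = L' := by
    rw [charsOf, PySem.List.foldl_append_eq_flatMap, List.nil_append, List.flatMap_def, hleft]
  have hRchars : charsOf group (PySem.List.pyRange ((j : Int) + (s : Int)) (j : Int) (-1)) = R' := by
    rw [charsOf, PySem.List.foldl_append_eq_flatMap, List.nil_append, List.flatMap_def, hright]
  have hso : (PySem.Str.join "" O).toList = L' := by
    rw [PySem.Str.toList_join, show "".toList = ([] : List Char) from rfl, joinNilSep]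
  have hsr : (PySem.Str.join "" R.reverse).toList = R' := by
    rw [PySem.Str.toList_join, show "".toList = ([] : List Char) from rfl, List.map_reverse,
      joinNilSep]
  unfold condA condB
  simp only [hsize, hsize', horig, hrefl, hLchars, hRchars, hso, hsr,
    PySem.List.sum_map_ite_one_zero]
  set c : Nat := (L'.zip R').countP (fun p => p.1 != p.2) with hc
  cases clean_mirrors with
  | true =>
    simp only [Bool.true_and, Bool.not_true, Bool.false_and, Bool.or_false]
    rw [if_pos trivial, Bool.eq_iff_iff]
    simp only [beq_iff_eq]
    omega
  | false =>
    simp only [Bool.false_and, Bool.not_false, Bool.true_and, Bool.false_or]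
    rw [if_neg (by simp : ¬ false = true), Bool.eq_iff_iff]
    simp only [beq_iff_eq]
    constructor
    · intro h
      rw [← hso, ← hsr, h]
    · intro h
      apply String.toList_inj.mp
      rw [hso, hsr, h]

theorem loopAB (group : List String) (clean_mirrors : Bool) (l : List Int)
    (h : ∀ i ∈ l, condA group clean_mirrors i = condB group clean_mirrors i) :
    loopA group clean_mirrors l = loopB group clean_mirrors l := by
  induction l with
  | nil => rfl
  | cons i rest ih =>
    rw [loopA, loopB, h i (by simp), ih (fun x hx => h x (by simp [hx]))]

-- ===== VERDICT (by name: the statement is the Claim_ definition above) =====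
theorem calc_mirrors_spec : Claim_equal_calc_mirrors := by
  intro group clean_mirrors _
  show calc_mirrors group clean_mirrors = calc_mirrors_alt group clean_mirrors
  unfold calc_mirrors calc_mirrors_alt
  apply loopAB
  intro i hi
  rw [PySem.List.mem_pyRange_one] at hi
  obtain ⟨h0, h1⟩ := hi
  have hi' : i = ((i.toNat : Nat) : Int) := by omega
  rw [hi']
  exact condAB group clean_mirrors i.toNat (by omega)
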